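-- pv_equiv track=rewrite | github.com/vincent-kangzhou/Leetcode_Easy | 788_Rotated Digits.py | validCheck
-- ===== SOURCE A (Python) =====
-- def validCheck(digit):
--
--     digits=[]
--     while digit>0:
--         digits.append(digit%10)
--         digit=digit//10
--     if sum([i in [3,4,7] for i in digits])>0:
--         return False
--     if sum([i in [0,1,8] for i in digits])==len(digits):
--         return False
--     return True
-- ===== SOURCE B (Python) =====
-- def validCheck(digit):
--     rotated = False
--     while digit > 0:
--         d = digit % 10
--         if d in (3, 4, 7):
--             return False
--         if d in (2, 5, 6, 9):
--             rotated = True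
--         digit //= 10
--     return rotated
-- ===== Notes on version B (the rewrite author's own statement) =====
-- stated objective: simpler
-- what changed: B does one pass over the digits while dividing, returning False immediately on a digit in {3,4,7} and tracking a single flag for rotating digits, instead of building a digit list and scanning it twice with indicator sums.
import Mathlib
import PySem

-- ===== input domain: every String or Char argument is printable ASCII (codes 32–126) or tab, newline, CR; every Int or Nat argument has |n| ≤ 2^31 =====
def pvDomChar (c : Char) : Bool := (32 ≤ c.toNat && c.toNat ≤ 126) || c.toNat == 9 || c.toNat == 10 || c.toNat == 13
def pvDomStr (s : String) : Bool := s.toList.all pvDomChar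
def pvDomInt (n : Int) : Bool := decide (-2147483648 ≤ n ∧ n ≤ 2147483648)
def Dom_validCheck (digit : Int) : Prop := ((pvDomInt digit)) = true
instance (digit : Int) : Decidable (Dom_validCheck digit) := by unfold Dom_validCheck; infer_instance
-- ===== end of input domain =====

-- B does one pass over the digits with an early False on {3,4,7} and a single rotation flag,
-- instead of A's digit list scanned twice with indicator sums (objective: simpler).

-- ===== PORT A =====
-- the while loop of A, building the digit list (least significant first, as append does)
def validCheckDigits (digit : Int) : List Int :=
  if h : 0 < digit then
    PySem.Int.mod digit 10 :: validCheckDigits (PySem.Int.floordiv digit 10)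
  else []
termination_by digit.toNat
decreasing_by
  rw [PySem.Int.floordiv_eq_ediv_of_pos (by omega : (0:Int) < 10)]
  omega

def validCheck (digit : Int) : Bool :=
  let digits := validCheckDigits digit
  if (digits.map (fun i => if i ∈ ([3, 4, 7] : List Int) then (1 : Int) else 0)).sum > 0 then
    false
  else if (digits.map (fun i => if i ∈ ([0, 1, 8] : List Int) then (1 : Int) else 0)).sum
      = (digits.length : Int) then
    false
  else
    true

-- ===== PORT B =====
def validCheckAltLoop (digit : Int) (rotated : Bool) : Bool :=
  if h : 0 < digit then
    let d := PySem.Int.mod digit 10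
    if d = 3 ∨ d = 4 ∨ d = 7 then false
    else
      validCheckAltLoop (PySem.Int.floordiv digit 10)
        (rotated || decide (d = 2 ∨ d = 5 ∨ d = 6 ∨ d = 9))
  else rotated
termination_by digit.toNat
decreasing_by
  rw [PySem.Int.floordiv_eq_ediv_of_pos (by omega : (0:Int) < 10)]
  omega

def validCheck_alt (digit : Int) : Bool := validCheckAltLoop digit false

-- ===== PRECONDITION & SPEC =====
def Spec_validCheck (digit : Int) (out : Bool) : Prop := out = validCheck_alt digit
instance (digit : Int) (out : Bool) : Decidable (Spec_validCheck digit out) := by unfold Spec_validCheck; infer_instance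

-- ===== CLAIM (what is proved, stated in full; the proofs are below) =====
def Claim_equal_validCheck : Prop := ∀ (digit : Int), Dom_validCheck digit → Spec_validCheck digit (validCheck digit)

-- ===== LEMMAS AND PROOFS =====

def pvIsBad (i : Int) : Bool := decide (i = 3 ∨ i = 4 ∨ i = 7)
def pvIsRot (i : Int) : Bool := decide (i = 2 ∨ i = 5 ∨ i = 6 ∨ i = 9)
def pvIs018 (i : Int) : Bool := decide (i = 0 ∨ i = 1 ∨ i = 8)
def pvBad (L : List Int) : Bool := L.any pvIsBad
def pvRot (L : List Int) : Bool := L.any pvIsRot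

theorem pvBad_cons (a : Int) (t : List Int) : pvBad (a :: t) = (pvIsBad a || pvBad t) := by
  simp [pvBad]

theorem pvRot_cons (a : Int) (t : List Int) : pvRot (a :: t) = (pvIsRot a || pvRot t) := by
  simp [pvRot]

theorem altLoop_eq (n : Nat) : ∀ (digit : Int), digit.toNat = n → ∀ (flag : Bool),
    validCheckAltLoop digit flag =
      if pvBad (validCheckDigits digit) then false
      else flag || pvRot (validCheckDigits digit) := by
  induction n using Nat.strong_induction_on with
  | _ n ih =>
    intro digit hn flag
    rw [validCheckAltLoop, validCheckDigits]
    by_cases h : 0 < digit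
    · rw [dif_pos h, dif_pos h]
      have hlt : (PySem.Int.floordiv digit 10).toNat < n := by
        rw [PySem.Int.floordiv_eq_ediv_of_pos (by omega : (0:Int) < 10)]; omega
      by_cases hd : PySem.Int.mod digit 10 = 3 ∨ PySem.Int.mod digit 10 = 4 ∨ PySem.Int.mod digit 10 = 7
      · have hh : pvIsBad (PySem.Int.mod digit 10) = true := decide_eq_true hd
        rw [if_pos hd, pvBad_cons, hh, Bool.true_or, if_pos rfl]
      · have hh : pvIsBad (PySem.Int.mod digit 10) = false := decide_eq_false hd
        have hr : decide (PySem.Int.mod digit 10 = 2 ∨ PySem.Int.mod digit 10 = 5 ∨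
            PySem.Int.mod digit 10 = 6 ∨ PySem.Int.mod digit 10 = 9)
            = pvIsRot (PySem.Int.mod digit 10) := rfl
        rw [if_neg hd, ih _ hlt _ rfl, pvBad_cons, pvRot_cons, hh, Bool.false_or]
        by_cases hb : pvBad (validCheckDigits (PySem.Int.floordiv digit 10)) = true
        · rw [if_pos hb, if_pos hb]
        · rw [if_neg hb, if_neg hb, hr, Bool.or_assoc]
    · rw [dif_neg h, dif_neg h]
      simp [pvBad, pvRot]

theorem digits_bound (n : Nat) : ∀ (digit : Int), digit.toNat = n →
    ∀ x ∈ validCheckDigits digit, 0 ≤ x ∧ x < 10 := by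
  induction n using Nat.strong_induction_on with
  | _ n ih =>
    intro digit hn x hx
    rw [validCheckDigits] at hx
    by_cases h : 0 < digit
    · rw [dif_pos h] at hx
      rcases List.mem_cons.mp hx with rfl | hx
      · exact ⟨PySem.Int.mod_nonneg _ (by omega), PySem.Int.mod_lt _ (by omega)⟩
      · have hlt : (PySem.Int.floordiv digit 10).toNat < n := by
          rw [PySem.Int.floordiv_eq_ediv_of_pos (by omega : (0:Int) < 10)]; omega
        exact ih _ hlt _ rfl x hx
    · rw [dif_neg h] at hx
      simp at hx

theorem sum347_pos (L : List Int) :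
    ((L.map (fun i => if i ∈ ([3, 4, 7] : List Int) then (1 : Int) else 0)).sum > 0)
      ↔ pvBad L = true := by
  induction L with
  | nil => simp [pvBad]
  | cons a t ih =>
    have hnn : 0 ≤ (t.map (fun i => if i ∈ ([3, 4, 7] : List Int) then (1 : Int) else 0)).sum := by
      apply List.sum_nonneg; intro x hx
      obtain ⟨y, _, rfl⟩ := List.mem_map.mp hx
      split_ifs <;> omega
    rw [List.map_cons, List.sum_cons, pvBad_cons]
    by_cases ha : a ∈ ([3, 4, 7] : List Int)
    · have hh : pvIsBad a = true := decide_eq_true (by simpa using ha)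
      rw [if_pos ha, hh, Bool.true_or]
      exact iff_of_true (by omega) rfl
    · have hh : pvIsBad a = false := decide_eq_false (by simpa using ha)
      rw [if_neg ha, hh, Bool.false_or, zero_add]
      exact ih

theorem sum018_len (L : List Int) :
    ((L.map (fun i => if i ∈ ([0, 1, 8] : List Int) then (1 : Int) else 0)).sum = (L.length : Int))
      ↔ L.all pvIs018 = true := by
  induction L with
  | nil => simp
  | cons a t ih =>
    have hle : (t.map (fun i => if i ∈ ([0, 1, 8] : List Int) then (1 : Int) else 0)).sum ≤ (t.length : Int) := by
      calc (t.map (fun i => if i ∈ ([0, 1, 8] : List Int) then (1 : Int) else 0)).sum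
          ≤ (t.map (fun _ => (1 : Int))).sum := by
            apply List.sum_le_sum; intro x hx; split_ifs <;> omega
        _ = (t.length : Int) := by simp
    rw [List.map_cons, List.sum_cons, List.length_cons, List.all_cons]
    push_cast
    by_cases ha : a ∈ ([0, 1, 8] : List Int)
    · have hh : pvIs018 a = true := decide_eq_true (by simpa using ha)
      rw [if_pos ha, hh, Bool.true_and]
      rw [← ih]
      constructor <;> intro h <;> omega
    · have hh : pvIs018 a = false := decide_eq_false (by simpa using ha)
      rw [if_neg ha, hh, Bool.false_and]
      simp only [Bool.false_eq_true, iff_false]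
      omega

theorem all018_iff_not_rot (L : List Int) (hb : ∀ x ∈ L, 0 ≤ x ∧ x < 10)
    (hnbad : pvBad L = false) :
    (L.all pvIs018 = true) ↔ pvRot L = false := by
  simp only [pvBad, List.any_eq_false, pvIsBad, decide_eq_true_eq,
    decide_eq_false_iff_not] at hnbad
  simp only [pvRot, List.all_eq_true, List.any_eq_false, pvIs018, pvIsRot,
    decide_eq_true_eq, decide_eq_false_iff_not]
  constructor
  · intro h x hx
    have := h x hx
    omega
  · intro h x hx
    have h1 := h x hx
    have h2 := hnbad x hx
    have h3 := hb x hx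
    omega

-- ===== VERDICT (by name: the statement is the Claim_ definition above) =====
theorem validCheck_spec : Claim_equal_validCheck := by
  intro digit _
  unfold Spec_validCheck validCheck validCheck_alt
  rw [altLoop_eq digit.toNat digit rfl false]
  have hb := digits_bound digit.toNat digit rfl
  simp only [Bool.false_or]
  by_cases h1 : pvBad (validCheckDigits digit) = true
  · rw [if_pos h1, if_pos ((sum347_pos _).mpr h1)]
  · have h1' : pvBad (validCheckDigits digit) = false := by simpa using h1
    rw [if_neg h1, if_neg (by rw [sum347_pos, h1']; simp)]
    by_cases h2 : pvRot (validCheckDigits digit) = true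
    · rw [h2, if_neg]
      rw [sum018_len, all018_iff_not_rot _ hb h1']
      simp [h2]
    · have h2' : pvRot (validCheckDigits digit) = false := by simpa using h2
      rw [h2', if_pos]
      rw [sum018_len, all018_iff_not_rot _ hb h1', h2']
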